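-- pv_equiv track=rewrite | github.com/sofyagdk/euplotes | prepare_data/3_find_frameshifts/graphmaker.py | filter_paralogues
-- ===== SOURCE A (Python) =====
-- def filter_paralogues(bp_dict):
-- 	animals = list()
-- 	para = list()
-- 	new_dict = dict()
--
-- 	for key in bp_dict.keys():
-- 		animal  = key[:4]
-- 		if animal in animals:
-- 			para.append(animal)
-- 		animals.append(key[:4])
--
-- 	for key in bp_dict:
-- 		animal  = key[:4]
-- 		if animal in para:
-- 			continue
-- 		else:
-- 			new_dict[key] = bp_dict[key]
--
-- 	return new_dict
-- ===== SOURCE B (Python) =====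
-- def filter_paralogues(bp_dict):
--     groups = {}
--     for key, value in bp_dict.items():
--         groups.setdefault(key[:4], []).append((key, value))
--     result = {}
--     for members in groups.values():
--         if len(members) == 1:
--             key, value = members[0]
--             result[key] = value
--     return result
-- ===== Notes on version B (the rewrite author's own statement) =====
-- stated objective: faster
-- what changed: A makes two staged passes with repeated list-membership scans over growing 'animals'/'para' lists; B instead groups the items by their 4-char prefix into a prefix->members dict in one pass and then emits the sole member of every singleton group.
import Mathlib
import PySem

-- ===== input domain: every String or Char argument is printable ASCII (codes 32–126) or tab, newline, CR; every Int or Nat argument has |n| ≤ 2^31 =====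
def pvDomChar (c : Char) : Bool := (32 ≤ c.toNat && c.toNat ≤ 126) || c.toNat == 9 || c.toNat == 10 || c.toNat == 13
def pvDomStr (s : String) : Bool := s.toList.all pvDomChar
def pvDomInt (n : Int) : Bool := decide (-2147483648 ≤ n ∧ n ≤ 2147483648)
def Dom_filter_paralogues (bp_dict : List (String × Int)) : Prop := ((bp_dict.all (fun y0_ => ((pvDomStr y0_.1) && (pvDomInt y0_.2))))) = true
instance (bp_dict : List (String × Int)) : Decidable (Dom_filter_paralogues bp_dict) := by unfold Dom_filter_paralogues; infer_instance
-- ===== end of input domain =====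

-- B groups the items by 4-char key prefix into a dict in one pass and emits the sole member of each singleton group (objective: faster).

-- ===== PORT A =====
-- key[:4]
def pvPrefix4 (s : String) : String := PySem.Str.slice s none (some 4)

def filter_paralogues (bp_dict : List (String × Int)) : List (String × Int) :=
  let d := PySem.Dict.mk bp_dict
  -- first loop: animals / para lists
  let ap := (PySem.Dict.keys d).foldl
      (fun (st : List String × List String) key =>
        (st.1 ++ [pvPrefix4 key],
         if pvPrefix4 key ∈ st.1 then st.2 ++ [pvPrefix4 key] else st.2))
      ([], [])
  -- second loop: bp_dict[key] never raises here since key ∈ keys, so getD is exact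
  let new_dict := (PySem.Dict.keys d).foldl
      (fun (nd : PySem.Dict String Int) key =>
        if pvPrefix4 key ∈ ap.2 then nd
        else PySem.Dict.insert nd key (PySem.Dict.getD d key 0))
      PySem.Dict.empty
  PySem.Dict.items new_dict

-- ===== PORT B =====
def filter_paralogues_alt (bp_dict : List (String × Int)) : List (String × Int) :=
  -- groups.setdefault(key[:4], []).append((key, value))  =  modify with default []
  let groups := bp_dict.foldl
      (fun (g : PySem.Dict String (List (String × Int))) kv =>
        PySem.Dict.modify g (pvPrefix4 kv.1) [] (fun ms => ms ++ [kv]))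
      PySem.Dict.empty
  -- for members in groups.values(): if len(members) == 1: key, value = members[0]; result[key] = value
  let result := (PySem.Dict.values groups).foldl
      (fun (r : PySem.Dict String Int) ms =>
        if ms.length = 1 then
          match PySem.List.pyGet? ms 0 with
          | some kv => PySem.Dict.insert r kv.1 kv.2
          | none => r
        else r)
      PySem.Dict.empty
  PySem.Dict.items result

-- ===== PRECONDITION & SPEC =====
-- The assoc list stands for a Python dict, whose keys are necessarily distinct; Pre_ states exactly that invariant (no dict input is excluded).
def Pre_filter_paralogues (bp_dict : List (String × Int)) : Prop :=
  (bp_dict.map Prod.fst).Nodup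
instance (bp_dict : List (String × Int)) : Decidable (Pre_filter_paralogues bp_dict) := by
  unfold Pre_filter_paralogues; infer_instance

def pvWitness_filter_paralogues : (List (String × Int)) :=
  [("ABCDx", 1), ("ABCDy", 2), ("EFGH", 3)]

def Spec_filter_paralogues (bp_dict : List (String × Int)) (out : List (String × Int)) : Prop := out = filter_paralogues_alt bp_dict
instance (bp_dict : List (String × Int)) (out : List (String × Int)) : Decidable (Spec_filter_paralogues bp_dict out) := by unfold Spec_filter_paralogues; infer_instance

-- ===== CLAIM (what is proved, stated in full; the proofs are below) =====
def Claim_equal_filter_paralogues : Prop := ∀ (bp_dict : List (String × Int)), Dom_filter_paralogues bp_dict → Pre_filter_paralogues bp_dict → Spec_filter_paralogues bp_dict (filter_paralogues bp_dict)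

-- ===== LEMMAS AND PROOFS =====

-- the canonical predicate both results are reduced to: "the 4-char prefix of kv's key occurs exactly once"
def pvUniq (bp : List (String × Int)) (kv : String × Int) : Bool :=
  (bp.map (fun x => pvPrefix4 x.1)).count (pvPrefix4 kv.1) == 1

-- A's first loop: x lands in 'para' iff, counting the initial 'animals' too, its
-- prefix occurs at least twice and at least once among the keys still to process.
theorem paraA_mem (ks : List String) (an pa : List String) (x : String) :
    (x ∈ (ks.foldl
        (fun (st : List String × List String) key =>
          (st.1 ++ [pvPrefix4 key],
           if pvPrefix4 key ∈ st.1 then st.2 ++ [pvPrefix4 key] else st.2))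
        (an, pa)).2)
    ↔ (x ∈ pa ∨ (0 < (ks.map pvPrefix4).count x ∧ 2 ≤ an.count x + (ks.map pvPrefix4).count x)) := by
  induction ks generalizing an pa with
  | nil => simp
  | cons k ks ih =>
    rw [List.foldl_cons, ih, List.map_cons]
    by_cases hmem : pvPrefix4 k ∈ an
    · have ha : 0 < an.count (pvPrefix4 k) := List.count_pos_iff.mpr hmem
      rw [if_pos hmem]
      by_cases hx : x = pvPrefix4 k
      · subst hx
        have e1 : (an ++ [pvPrefix4 k]).count (pvPrefix4 k) = an.count (pvPrefix4 k) + 1 := by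
          simp [List.count_append]
        have e2 : ((pvPrefix4 k) :: ks.map pvPrefix4).count (pvPrefix4 k)
            = (ks.map pvPrefix4).count (pvPrefix4 k) + 1 := List.count_cons_self
        rw [e1, e2]
        constructor
        · intro _; exact Or.inr ⟨by omega, by omega⟩
        · intro _; exact Or.inl (by simp)
      · have hx' : ¬ pvPrefix4 k = x := fun h => hx h.symm
        have e1 : (an ++ [pvPrefix4 k]).count x = an.count x := by
          simp [List.count_append, hx']
        have e2 : ((pvPrefix4 k) :: ks.map pvPrefix4).count x = (ks.map pvPrefix4).count x := by
          simp [hx']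
        rw [e1, e2]
        simp [hx]
    · have ha0 : an.count (pvPrefix4 k) = 0 := List.count_eq_zero.mpr hmem
      rw [if_neg hmem]
      by_cases hx : x = pvPrefix4 k
      · subst hx
        have e1 : (an ++ [pvPrefix4 k]).count (pvPrefix4 k) = an.count (pvPrefix4 k) + 1 := by
          simp [List.count_append]
        have e2 : ((pvPrefix4 k) :: ks.map pvPrefix4).count (pvPrefix4 k)
            = (ks.map pvPrefix4).count (pvPrefix4 k) + 1 := List.count_cons_self
        rw [e1, e2, ha0]
        constructor
        · rintro (h | h)
          · exact Or.inl h
          · exact Or.inr ⟨by omega, by omega⟩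
        · rintro (h | h)
          · exact Or.inl h
          · exact Or.inr ⟨by omega, by omega⟩
      · have hx' : ¬ pvPrefix4 k = x := fun h => hx h.symm
        have e1 : (an ++ [pvPrefix4 k]).count x = an.count x := by
          simp [List.count_append, hx']
        have e2 : ((pvPrefix4 k) :: ks.map pvPrefix4).count x = (ks.map pvPrefix4).count x := by
          simp [hx']
        rw [e1, e2]

-- first-occurrence dedup is invisible to a filter that only keeps elements of multiplicity ≤ 1
theorem set_filter_count_le_one (ps : List String) (q : String → Bool)
    (h : ∀ p, q p = true → ps.count p ≤ 1) :
    (PySem.Set.ofList ps).filter q = ps.filter q := by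
  induction ps with
  | nil => rfl
  | cons p ps ih =>
    have hih := ih (fun p' hp' => by
      have := h p' hp'
      rw [List.count_cons] at this
      omega)
    rw [PySem.Set.ofList_cons]
    by_cases hq : q p = true
    · have hcount : ps.count p = 0 := by
        have := h p hq
        rw [List.count_cons_self] at this
        omega
      have hnot : p ∉ PySem.Set.ofList ps := by
        rw [PySem.Set.mem_ofList]
        exact List.count_eq_zero.mp hcount
      have hdisc : (PySem.Set.ofList ps).discard p = PySem.Set.ofList ps := by
        apply List.filter_eq_self.mpr
        intro a ha
        have : a ≠ p := fun e => hnot (e ▸ ha)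
        simp [this]
      rw [hdisc]
      simp [hq, hih]
    · have hstep : ((PySem.Set.ofList ps).discard p).filter q = (PySem.Set.ofList ps).filter q := by
        show ((PySem.Set.ofList ps).filter _).filter q = _
        rw [List.filter_filter]
        apply List.filter_congr
        intro a _
        by_cases hqa : q a = true
        · have : ¬ a = p := by intro e; subst e; exact hq hqa
          simp [hqa, this]
        · simp [Bool.not_eq_true] at hqa
          simp [hqa]
      simp [hq, hstep, hih]

-- a loop that SKIPS on a condition is a fold over the complementary filter
theorem foldl_skip_filter {β γ : Type} (l : List β) (P : β → Prop) [DecidablePred P]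
    (f : γ → β → γ) (init : γ) :
    l.foldl (fun acc x => if P x then acc else f acc x) init
      = (l.filter (fun x => decide ¬ P x)).foldl f init := by
  rw [List.foldl_filter]
  apply PySem.List.foldl_congr_mem
  intro acc x _
  by_cases h : P x <;> simp [h]

-- A reduced to the canonical filter
theorem filterA_eq (bp : List (String × Int)) (hpre : (bp.map Prod.fst).Nodup) :
    filter_paralogues bp = bp.filter (pvUniq bp) := by
  unfold filter_paralogues
  simp only []
  have hkeys : PySem.Dict.keys (PySem.Dict.mk bp) = bp.map Prod.fst := rfl
  rw [hkeys]
  set d := PySem.Dict.mk bp with hd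
  set ks := bp.map Prod.fst with hks
  set para := (ks.foldl
      (fun (st : List String × List String) key =>
        (st.1 ++ [pvPrefix4 key],
         if pvPrefix4 key ∈ st.1 then st.2 ++ [pvPrefix4 key] else st.2))
      ([], [])).2 with hpara
  -- membership in para for keys of bp
  have hparaIff : ∀ k ∈ ks, (pvPrefix4 k ∉ para ↔ (ks.map pvPrefix4).count (pvPrefix4 k) = 1) := by
    intro k hk
    have hpos : 0 < (ks.map pvPrefix4).count (pvPrefix4 k) :=
      List.count_pos_iff.mpr (List.mem_map.mpr ⟨k, hk, rfl⟩)
    rw [hpara, paraA_mem]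
    simp only [List.not_mem_nil, List.count_nil, false_or, Nat.zero_add]
    omega
  -- the second loop is a fold over the filtered key list
  rw [foldl_skip_filter]
  have hfresh : ∀ k ∈ ks.filter (fun k => decide (pvPrefix4 k ∉ para)),
      PySem.Dict.contains (PySem.Dict.empty : PySem.Dict String Int) k = false := by
    intro k _; simp [pysem]
  have hnd : (ks.filter (fun k => decide (pvPrefix4 k ∉ para))).Nodup :=
    List.Sublist.nodup List.filter_sublist hpre
  have hitems := PySem.Dict.items_foldl_insert_fresh
      (ks.filter (fun k => decide (pvPrefix4 k ∉ para)))
      (fun k => k) (fun k => PySem.Dict.getD d k 0) PySem.Dict.empty hfresh (by simpa using hnd)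
  simp only [] at hitems
  rw [hitems]
  rw [show (PySem.Dict.empty : PySem.Dict String Int).items = [] from rfl, List.nil_append]
  -- convert the filtered key list to a filtered item list
  have hflt : ks.filter (fun k => decide (pvPrefix4 k ∉ para))
      = (bp.filter (fun kv => decide (pvPrefix4 kv.1 ∉ para))).map Prod.fst := by
    rw [hks, List.filter_map]; rfl
  rw [hflt, List.map_map]
  have hpred : bp.filter (fun kv => decide (pvPrefix4 kv.1 ∉ para)) = bp.filter (pvUniq bp) := by
    apply List.filter_congr
    intro kv hkv
    have h1 := hparaIff kv.1 (List.mem_map.mpr ⟨kv, hkv, rfl⟩)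
    have hmaps : ks.map pvPrefix4 = bp.map (fun x => pvPrefix4 x.1) := by
      rw [hks, List.map_map]; rfl
    unfold pvUniq
    rw [← hmaps]
    by_cases hc : (ks.map pvPrefix4).count (pvPrefix4 kv.1) = 1
    · simp only [hc, decide_eq_true (h1.mpr hc)]
      decide
    · have hmem : pvPrefix4 kv.1 ∈ para := by
        by_contra hno
        exact hc (h1.mp hno)
      simp only [decide_eq_false (by simpa using hmem : ¬ pvPrefix4 kv.1 ∉ para)]
      have : ((ks.map pvPrefix4).count (pvPrefix4 kv.1) == 1) = false := by
        simpa using hc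
      rw [this]
  rw [hpred]
  conv_rhs => rw [← List.map_id (bp.filter (pvUniq bp))]
  apply List.map_congr_left
  intro kv hkv
  have hmem : kv ∈ bp := (List.mem_filter.mp hkv).1
  have hget : PySem.Dict.getD d kv.1 0 = kv.2 := by
    apply PySem.Dict.getD_of_mem_items d ?_ (by exact hpre) 0
    show (kv.1, kv.2) ∈ bp
    simpa using hmem
  simp [Function.comp, hget]

-- a loop that ACTS on a condition is a fold over the filter
theorem foldl_keep_filter {β γ : Type} (l : List β) (P : β → Prop) [DecidablePred P]
    (f : γ → β → γ) (init : γ) :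
    l.foldl (fun acc x => if P x then f acc x else acc) init
      = (l.filter (fun x => decide (P x))).foldl f init := by
  rw [List.foldl_filter]
  apply PySem.List.foldl_congr_mem
  intro acc x _
  by_cases h : P x <;> simp [h]

-- B reduced to the canonical filter
theorem filterB_eq (bp : List (String × Int)) (hpre : (bp.map Prod.fst).Nodup) :
    filter_paralogues_alt bp = bp.filter (pvUniq bp) := by
  unfold filter_paralogues_alt
  simp only []
  set P := bp.map (fun kv => pvPrefix4 kv.1) with hP
  set grp := fun c => bp.filter (fun kv => pvPrefix4 kv.1 == c) with hgrp
  set groups := bp.foldl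
      (fun (g : PySem.Dict String (List (String × Int))) kv =>
        PySem.Dict.modify g (pvPrefix4 kv.1) [] (fun ms => ms ++ [kv]))
      PySem.Dict.empty with hgroups
  have hcnt : ∀ c, (grp c).length = P.count c := by
    intro c
    rw [hgrp, hP, List.count_eq_countP, List.countP_map, List.countP_eq_length_filter]
    rfl
  have hfold : groups = (bp.map (fun kv => (pvPrefix4 kv.1, kv))).foldl
      (fun (g : PySem.Dict String (List (String × Int))) p =>
        PySem.Dict.modify g p.1 [] (fun ms => ms ++ [p.2])) PySem.Dict.empty := by
    rw [hgroups, List.foldl_map]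
  have hgetD : ∀ c, PySem.Dict.getD groups c [] = grp c := by
    intro c
    rw [hfold, PySem.Dict.getD_foldl_modify_append]
    rw [List.filter_map, List.map_map]
    rw [show (PySem.Dict.empty : PySem.Dict String (List (String × Int))).getD c [] = [] from rfl]
    rw [List.nil_append, hgrp]
    exact List.map_id _
  have hkeysg : PySem.Dict.keys groups = PySem.Set.ofList P := by
    rw [hgroups]
    rw [PySem.Dict.keys_foldl_modify_key bp (fun kv => pvPrefix4 kv.1) []
      (fun _ kv => fun ms => ms ++ [kv]) PySem.Dict.empty]
    rw [show PySem.Dict.keys (PySem.Dict.empty : PySem.Dict String (List (String × Int))) = [] from rfl]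
    rw [PySem.Set.update_nil_left, hP]
  have hndk : (PySem.Dict.keys groups).Nodup := by
    rw [hgroups]
    apply PySem.Dict.nodup_keys_foldl_modify_key bp (fun kv => pvPrefix4 kv.1) []
      (fun _ kv => fun ms => ms ++ [kv]) PySem.Dict.empty
    exact List.nodup_nil
  have hvals : PySem.Dict.values groups = (PySem.Set.ofList P).map grp := by
    rw [PySem.Dict.values_eq_map_keys groups hndk [], hkeysg]
    exact List.map_congr_left (fun c _ => hgetD c)
  rw [hvals, List.foldl_map, foldl_keep_filter]
  have hq : ∀ c, (decide ((grp c).length = 1) = true) → P.count c ≤ 1 := by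
    intro c hc
    rw [← hcnt c]
    simp only [decide_eq_true_iff] at hc
    omega
  rw [set_filter_count_le_one P _ hq]
  have hPfilter : P.filter (fun c => decide ((grp c).length = 1))
      = (bp.filter (fun kv => decide ((grp (pvPrefix4 kv.1)).length = 1))).map
          (fun kv => pvPrefix4 kv.1) := by
    rw [hP, List.filter_map]
    rfl
  rw [hPfilter, List.foldl_map]
  set bpq := bp.filter (fun kv => decide ((grp (pvPrefix4 kv.1)).length = 1)) with hbpq
  have hstep : ∀ (r : PySem.Dict String Int), ∀ kv ∈ bpq,
      (match PySem.List.pyGet? (grp (pvPrefix4 kv.1)) 0 with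
        | some kv' => PySem.Dict.insert r kv'.1 kv'.2
        | none => r)
      = PySem.Dict.insert r kv.1 kv.2 := by
    intro r kv hkv
    have hmem : kv ∈ bp := (List.mem_filter.mp hkv).1
    have hlen : (grp (pvPrefix4 kv.1)).length = 1 := by
      have := (List.mem_filter.mp hkv).2
      simpa using this
    have hkvg : kv ∈ grp (pvPrefix4 kv.1) := by
      rw [hgrp]
      exact List.mem_filter.mpr ⟨hmem, by simp⟩
    obtain ⟨a, ha⟩ := List.length_eq_one_iff.mp hlen
    rw [ha] at hkvg
    have hak : kv = a := by simpa using hkvg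
    rw [ha, ← hak]
    rfl
  rw [PySem.List.foldl_congr_mem bpq _ (fun r kv => PySem.Dict.insert r kv.1 kv.2)
    PySem.Dict.empty (fun r kv hkv => hstep r kv hkv)]
  have hfresh : ∀ kv ∈ bpq,
      PySem.Dict.contains (PySem.Dict.empty : PySem.Dict String Int) kv.1 = false := by
    intro kv _; simp [pysem]
  have hnd : (bpq.map Prod.fst).Nodup := by
    rw [hbpq]
    exact List.Sublist.nodup (List.Sublist.map Prod.fst List.filter_sublist) hpre
  rw [PySem.Dict.items_foldl_insert_fresh bpq Prod.fst Prod.snd PySem.Dict.empty hfresh hnd]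
  rw [show (PySem.Dict.empty : PySem.Dict String Int).items = [] from rfl, List.nil_append]
  have hmapid : bpq.map (fun kv => (kv.1, kv.2)) = bpq := by
    conv_rhs => rw [← List.map_id bpq]
    rfl
  rw [hmapid, hbpq]
  apply List.filter_congr
  intro kv _
  rw [hcnt]
  unfold pvUniq
  rw [← hP]
  by_cases h : P.count (pvPrefix4 kv.1) = 1
  · simp [h]
  · simp [h]

theorem filter_paralogues_spec : Claim_equal_filter_paralogues := by
  intro bp _hdom hpre
  unfold Spec_filter_paralogues
  rw [filterA_eq bp hpre, filterB_eq bp hpre]
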